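-- pv_equiv track=rewrite | github.com/andrea-muresan/UBB-Informatica | Anul_2/Semestrul_2/Inteligenta arificiala/Lab1/1.py | ultim_cuvant_alfabetic
-- ===== SOURCE A (Python) =====
-- def ultim_cuvant_alfabetic(txt):
--     """
--     Returneaza ultimul cuvant dpdv alfabetic dintr-un text dat
--     :param txt: textul dat
--     :complexity - time:  O(n)
--                 - space: O(n)
--     """
--     # Elimina semnele de punctuatie
--     for punctuatie in '.,?!':
--         txt = txt.replace(punctuatie, '')
--
--     cuvinte = txt.split()
--     if len(cuvinte) != 0:
--         el = cuvinte[0]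
--         for word in cuvinte:
--             if word.lower() > el.lower():
--                 el = word
--
--         return el
--     else:
--         return None
-- ===== SOURCE B (Python) =====
-- def ultim_cuvant_alfabetic(txt):
--     best = None
--     cur = []
--     for ch in txt:
--         if ch in '.,?!':
--             continue
--         if ch.isspace():
--             if cur:
--                 w = ''.join(cur)
--                 if best is None or w.lower() > best.lower():
--                     best = w
--                 cur = []
--         else:
--             cur.append(ch)
--     if cur:
--         w = ''.join(cur)
--         if best is None or w.lower() > best.lower():
--             best = w
--     return best
-- ===== Notes on version B (the rewrite author's own statement) =====
-- stated objective: alternative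
-- what changed: A's three staged passes (four punctuation replaces, split(), then a max-scan over the word list) are replaced by one character-level pass that skips punctuation, assembles words in an accumulator and keeps the running alphabetical maximum, so no intermediate cleaned string or word list is built.
import Mathlib
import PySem

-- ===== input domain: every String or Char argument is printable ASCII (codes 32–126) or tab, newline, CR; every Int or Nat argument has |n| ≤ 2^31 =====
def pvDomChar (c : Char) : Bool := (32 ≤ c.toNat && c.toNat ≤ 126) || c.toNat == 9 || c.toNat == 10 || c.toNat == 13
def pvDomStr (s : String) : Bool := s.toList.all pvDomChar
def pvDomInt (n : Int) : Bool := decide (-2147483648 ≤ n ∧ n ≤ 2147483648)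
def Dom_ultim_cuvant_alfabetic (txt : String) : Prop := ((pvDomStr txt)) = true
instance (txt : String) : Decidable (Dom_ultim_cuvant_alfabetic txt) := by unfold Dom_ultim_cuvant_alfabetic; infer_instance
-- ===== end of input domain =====

-- B replaces A's three staged passes (punctuation replace, split, max-scan) by ONE character-level
-- pass that skips punctuation, assembles words and keeps the running alphabetical maximum (alternative).

-- ===== PORT A =====
def ultim_cuvant_alfabetic (txt : String) : Option String :=
  -- for punctuatie in '.,?!': txt = txt.replace(punctuatie, '')
  let txt := [".", ",", "?", "!"].foldl (fun t p => PySem.Str.replace t p "") txt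
  let cuvinte := PySem.Str.split₀ txt
  match cuvinte with
  | [] => none
  | el0 :: _ =>
      -- el = cuvinte[0]; for word in cuvinte: if word.lower() > el.lower(): el = word
      some (cuvinte.foldl
        (fun el word => if PySem.Str.lower el < PySem.Str.lower word then word else el) el0)

-- ===== PORT B =====
-- 'if cur: w = ''.join(cur); if best is None or w.lower() > best.lower(): best = w'
def pvFlush (best : Option String) (cur : List Char) : Option String :=
  if cur = [] then best
  else
    let w := String.ofList cur
    match best with
    | none => some w
    | some b => if PySem.Str.lower b < PySem.Str.lower w then some w else some b

-- one loop body: skip '.,?!', close the word on whitespace, otherwise extend it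
def pvStep (st : Option String × List Char) (ch : Char) : Option String × List Char :=
  if ch ∈ ['.', ',', '?', '!'] then st
  else if PySem.Chars.isspace ch then (pvFlush st.1 st.2, [])
  else (st.1, st.2 ++ [ch])

def ultim_cuvant_alfabetic_alt (txt : String) : Option String :=
  let st := txt.toList.foldl pvStep (none, [])
  pvFlush st.1 st.2

-- ===== PRECONDITION & SPEC =====
def Spec_ultim_cuvant_alfabetic (txt : String) (out : Option String) : Prop := out = ultim_cuvant_alfabetic_alt txt
instance (txt : String) (out : Option String) : Decidable (Spec_ultim_cuvant_alfabetic txt out) := by unfold Spec_ultim_cuvant_alfabetic; infer_instance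

-- ===== CLAIM (what is proved, stated in full; the proofs are below) =====
def Claim_equal_ultim_cuvant_alfabetic : Prop := ∀ (txt : String), Dom_ultim_cuvant_alfabetic txt → Spec_ultim_cuvant_alfabetic txt (ultim_cuvant_alfabetic txt)

-- ===== LEMMAS AND PROOFS =====

-- the optional best-so-far update, as a fold step over whole words
def pvBestW (b : Option String) (w : String) : Option String :=
  match b with
  | none => some w
  | some el => some (if PySem.Str.lower el < PySem.Str.lower w then w else el)

theorem pvFlush_ne (best : Option String) (cur : List Char) (h : cur ≠ []) :
    pvFlush best cur = pvBestW best (String.ofList cur) := by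
  cases best <;> simp [pvFlush, pvBestW, h, apply_ite some]

theorem replace_go_single (p : Char) :
    ∀ (l : List Char) (fuel : Nat) (acc : List Char), l.length ≤ fuel →
      PySem.Chars.replace.go [p] [] fuel l acc = acc.reverse ++ l.filter (· != p) := by
  intro l
  induction l with
  | nil =>
    intro fuel acc _
    cases fuel <;> simp [PySem.Chars.replace.go]
  | cons c t ih =>
    intro fuel acc hle
    cases fuel with
    | zero => simp at hle
    | succ f =>
      by_cases hc : c = p
      · subst hc
        have hpre : ([c] : List Char).isPrefixOf (c :: t) = true := by simp [List.isPrefixOf]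
        simp only [PySem.Chars.replace.go, hpre, if_true, List.length_cons, List.length_nil,
          List.drop_succ_cons, List.drop_zero, List.reverse_nil, List.nil_append]
        rw [ih f acc (by simp at hle ⊢; omega)]
        simp
      · have hpre : ([p] : List Char).isPrefixOf (c :: t) = false := by
          simp only [List.isPrefixOf, Bool.and_true]
          exact beq_eq_false_iff_ne.mpr (fun h => hc h.symm)
        simp only [PySem.Chars.replace.go, hpre, Bool.false_eq_true, if_false]
        rw [ih f (c :: acc) (by simp at hle ⊢; omega)]
        simp [hc]

theorem replace_single (s : List Char) (p : Char) :
    PySem.Chars.replace s [p] [] = s.filter (· != p) := by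
  have : ([p] : List Char).isEmpty = false := rfl
  simp only [PySem.Chars.replace, this, Bool.false_eq_true, if_false]
  exact replace_go_single p s s.length [] (le_refl _)

-- split₀.go's word accumulator can be pulled out front
theorem split0_go_acc :
    ∀ (cs cur : List Char) (acc : List (List Char)),
      PySem.Chars.split₀.go cs cur acc = acc.reverse ++ PySem.Chars.split₀.go cs cur [] := by
  intro cs
  induction cs with
  | nil =>
    intro cur acc
    by_cases h : cur.isEmpty <;> simp [PySem.Chars.split₀.go, h]
  | cons c rest ih =>
    intro cur acc
    by_cases hs : PySem.Chars.isspace c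
    · by_cases hcur : cur.isEmpty
      · simp only [PySem.Chars.split₀.go, hs, hcur, if_true]
        exact ih [] acc
      · simp only [PySem.Chars.split₀.go, hs, hcur, Bool.false_eq_true, if_false, if_true]
        rw [ih [] (cur.reverse :: acc), ih [] [cur.reverse]]
        simp
    · simp only [PySem.Chars.split₀.go, hs, Bool.false_eq_true, if_false]
      exact ih (c :: cur) acc

-- the loop body without the punctuation skip
def pvG (st : Option String × List Char) (ch : Char) : Option String × List Char :=
  if PySem.Chars.isspace ch then (pvFlush st.1 st.2, []) else (st.1, st.2 ++ [ch])

theorem pvStep_eq (st : Option String × List Char) (c : Char) :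
    pvStep st c = if c ∈ ['.', ',', '?', '!'] then st else pvG st c := rfl

-- skipping punctuation inside the loop = filtering it out beforehand
theorem foldl_pvStep_filter :
    ∀ (l : List Char) (st : Option String × List Char),
      l.foldl pvStep st = (l.filter (fun c => !decide (c ∈ ['.', ',', '?', '!']))).foldl pvG st := by
  intro l
  induction l with
  | nil => intro st; rfl
  | cons c t ih =>
    intro st
    simp only [List.foldl_cons, pvStep_eq, List.filter_cons]
    by_cases hc : c ∈ ['.', ',', '?', '!']
    · simp only [hc, if_true, decide_true, Bool.not_true, Bool.false_eq_true, if_false]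
      exact ih st
    · simp only [hc, if_false, decide_false, Bool.not_false, if_true, List.foldl_cons]
      exact ih (pvG st c)

-- MAIN INVARIANT: the single pass with a running best equals folding pvBestW over split₀'s words
theorem pv_scan_inv :
    ∀ (cs : List Char) (cur : List Char) (best : Option String),
      (let st := cs.foldl pvG (best, cur); pvFlush st.1 st.2)
        = ((PySem.Chars.split₀.go cs cur.reverse []).map String.ofList).foldl pvBestW best := by
  intro cs
  induction cs with
  | nil =>
    intro cur best
    by_cases h : cur = []
    · subst h; simp [PySem.Chars.split₀.go, pvFlush]
    · have he : cur.reverse.isEmpty = false := by simpa [List.isEmpty_iff] using h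
      simp [PySem.Chars.split₀.go, he, pvFlush_ne _ _ h]
  | cons c rest ih =>
    intro cur best
    by_cases hs : PySem.Chars.isspace c
    · by_cases hcur : cur = []
      · subst hcur
        simp only [List.foldl_cons, pvG, hs, if_true, List.reverse_nil]
        have hgo : PySem.Chars.split₀.go (c :: rest) [] [] = PySem.Chars.split₀.go rest [] [] := by
          simp [PySem.Chars.split₀.go, hs]
        rw [hgo]
        have h2 := ih [] best
        simp only [List.reverse_nil] at h2
        simpa [pvFlush] using h2
      · have he : cur.reverse.isEmpty = false := by simpa [List.isEmpty_iff] using hcur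
        simp only [List.foldl_cons, pvG, hs, if_true]
        have hgo : PySem.Chars.split₀.go (c :: rest) cur.reverse []
            = cur :: PySem.Chars.split₀.go rest [] [] := by
          simp only [PySem.Chars.split₀.go, hs, he, Bool.false_eq_true, if_false, if_true]
          rw [split0_go_acc rest [] [cur.reverse.reverse]]
          simp
        rw [hgo, pvFlush_ne best cur hcur]
        have h2 := ih [] (pvBestW best (String.ofList cur))
        simp only [List.reverse_nil] at h2
        simpa using h2
    · simp only [List.foldl_cons, pvG, hs, Bool.false_eq_true, if_false]
      have hgo : PySem.Chars.split₀.go (c :: rest) cur.reverse []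
          = PySem.Chars.split₀.go rest ((cur ++ [c]).reverse) [] := by
        simp [PySem.Chars.split₀.go, hs]
      rw [hgo]
      exact ih (cur ++ [c]) best

-- A's first-max scan over a nonempty word list, as a fold of pvBestW from none
theorem foldl_pick_some :
    ∀ (t : List String) (x : String),
      t.foldl pvBestW (some x)
        = some (t.foldl (fun el w => if PySem.Str.lower el < PySem.Str.lower w then w else el) x) := by
  intro t
  induction t with
  | nil => intro x; rfl
  | cons h t ih => intro x; simpa [pvBestW] using ih _

theorem pv_foldA (ws : List String) :
    (match ws with
     | [] => none
     | el0 :: _ => some (ws.foldl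
        (fun el word => if PySem.Str.lower el < PySem.Str.lower word then word else el) el0))
      = ws.foldl pvBestW none := by
  cases ws with
  | nil => rfl
  | cons h t =>
    simp only [List.foldl_cons, ite_self, pvBestW]
    exact (foldl_pick_some t h).symm

-- the four single-character replaces amount to one filter
theorem pv_clean_toList (txt : String) :
    ([".", ",", "?", "!"].foldl (fun t p => PySem.Str.replace t p "") txt).toList
      = txt.toList.filter (fun c => !decide (c ∈ ['.', ',', '?', '!'])) := by
  simp only [List.foldl_cons, List.foldl_nil, PySem.Str.replace, String.toList_ofList]
  have h : ∀ (l : List Char) (p : Char),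
      PySem.Chars.replace l [p] [] = l.filter (· != p) := replace_single
  show PySem.Chars.replace (PySem.Chars.replace (PySem.Chars.replace (PySem.Chars.replace
      txt.toList ".".toList "".toList) ",".toList "".toList) "?".toList "".toList) "!".toList "".toList = _
  rw [show (".".toList) = ['.'] from rfl, show (",".toList) = [','] from rfl,
      show ("?".toList) = ['?'] from rfl, show ("!".toList) = ['!'] from rfl,
      show ("".toList) = ([] : List Char) from rfl]
  rw [h, h, h, h]
  simp only [List.filter_filter]
  apply List.filter_congr
  intro c _
  by_cases h1 : c = '.' <;> by_cases h2 : c = ',' <;> by_cases h3 : c = '?' <;> by_cases h4 : c = '!' <;>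
    simp [h1, h2, h3, h4]

-- ===== VERDICT (by name: the statement is the Claim_ definition above) =====
theorem ultim_cuvant_alfabetic_spec : Claim_equal_ultim_cuvant_alfabetic := by
  intro txt _
  unfold Spec_ultim_cuvant_alfabetic ultim_cuvant_alfabetic ultim_cuvant_alfabetic_alt
  rw [foldl_pvStep_filter]
  have hB := pv_scan_inv (txt.toList.filter (fun c => !decide (c ∈ ['.', ',', '?', '!']))) [] none
  simp only [List.reverse_nil] at hB
  rw [hB, pv_foldA]
  rw [show ∀ s, PySem.Str.split₀ s = (PySem.Chars.split₀ s.toList).map String.ofList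
        from fun _ => rfl,
      pv_clean_toList]
  rfl
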